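-- pv_equiv track=rewrite | github.com/tsuru7/algorithm-study | AtCoder/ABC271/D.py | solve
-- ===== SOURCE A (Python) =====
-- def solve(n,s,abList):
--     dp = [[(0, ' ') for _ in range(10001)] for _ in range(n+1)]
--     dp[0][0] = (1, ' ')
--     for i in range(1, n+1):
--         ai, bi = abList[i-1]
--         for j in range(10001):
--             if j-ai >= 0 and dp[i-1][j-ai][0] > 0:
--                 dp[i][j] = (ai, 'H')
--             if j-bi >= 0 and dp[i-1][j-bi][0] > 0:
--                 dp[i][j] = (bi, 'T')
--     if dp[n][s][0] == 0:
--         return ['No']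
--     seq = ''
--     x = s
--     for i in range(1, n+1)[::-1]:
--         seq += dp[i][x][1]
--         x -= dp[i][x][0]
--     ans = ['Yes', seq[::-1]]
--     return ans
-- ===== SOURCE B (Python) =====
-- def _push(cur, a, b):
--     # one card: each live cell pushes its sum forward; a 'T' (+b) write overwrites an 'H' (+a) one
--     nxt = {}
--     for x, cell in cur.items():
--         if cell[0] > 0 and x + a <= 10000:
--             nxt[x + a] = (a, 'H', cell)
--     for x, cell in cur.items():
--         if cell[0] > 0 and x + b <= 10000:
--             nxt[x + b] = (b, 'T', cell)
--     return nxt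
--
--
-- def solve(n, s, abList):
--     # One rolling dict sum -> (value, face, parent cell): the sparse cells of the DP,
--     # carried forward with shared parent links; the answer is read straight off the
--     # chain at s — no (n+1)x10001 table, no backward reconstruction pass.
--     cur = {0: (1, '', None)}
--     for i in range(n):
--         a, b = abList[i]
--         cur = _push(cur, a, b)
--     cell = cur.get(s)
--     if cell is None or cell[0] == 0:
--         return ['No']
--     seq = []
--     while cell[1]:
--         seq.append(cell[1])
--         cell = cell[2]
--     return ['Yes', ''.join(reversed(seq))]
-- ===== Notes on version B (the rewrite author's own statement) =====
-- stated objective: faster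
-- what changed: Replaces A's two-stage algorithm (build an (n+1)x10001 table of (value,char) cells by scanning all 10001 sums per card and pulling predecessors, then a second backward reconstruction loop over the table) with a single forward pass over one rolling dict mapping each written sum to its sparse DP cell (value, face, parent-cell link): only live cells push (+a as 'H', then +b as 'T' overwriting, preserving A's tie-break and its dead-cell shadowing for 0-valued cards), and the answer string is read straight off the parent chain at s — no table and no backtracking pass.
-- outside the precondition, e.g. on solve(1, -10000, [(1, 2)]): A returns ['Yes', 'H'], B returns ['No']; on solve(1, -1, [(1, 10000)]): A returns ['Yes', 'T'], B returns ['No']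
import Mathlib
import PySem

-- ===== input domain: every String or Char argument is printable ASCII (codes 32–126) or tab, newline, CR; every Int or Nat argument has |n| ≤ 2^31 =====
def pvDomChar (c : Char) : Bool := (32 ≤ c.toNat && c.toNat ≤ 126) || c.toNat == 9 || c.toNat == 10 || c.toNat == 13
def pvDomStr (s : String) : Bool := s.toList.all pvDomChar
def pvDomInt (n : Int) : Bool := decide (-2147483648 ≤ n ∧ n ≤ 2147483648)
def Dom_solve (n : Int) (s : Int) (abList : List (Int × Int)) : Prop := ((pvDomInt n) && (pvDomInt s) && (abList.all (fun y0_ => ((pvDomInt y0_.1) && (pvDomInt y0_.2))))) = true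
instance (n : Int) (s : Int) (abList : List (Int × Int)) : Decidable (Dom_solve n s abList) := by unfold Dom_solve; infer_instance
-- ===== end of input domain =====

-- B replaces A's two-stage DP (full (n+1)x10001 pull-table + backward reconstruction pass)
-- with a single forward pass over one rolling dict sum -> sparse DP cell with parent link
-- (objective: faster).


-- ===== PORT A =====
-- dp cells are (value, char) pairs; a 1-character Python string is ported as Char.
def row0 : List (Int × Char) := (List.replicate 10001 ((0 : Int), ' ')).set 0 (1, ' ')

-- the inner 'for j in range(10001)' loop writing dp[i][j] (cells only read row i-1).
-- prev is row i-1 passed as an Array view purely for O(1) indexing (same values);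
-- the j - ai ≥ 0 guard mirrors Python, and inside Pre_solve every index is in range.
def solveRow (prev : Array (Int × Char)) (ai bi : Int) : List (Int × Char) :=
  (PySem.List.pyRange 0 10001 1).map (fun j =>
    let c0 : Int × Char := (0, ' ')
    let c1 : Int × Char :=
      if j - ai ≥ 0 ∧ 0 < ((prev[(j - ai).toNat]?).getD (0, ' ')).1 then (ai, 'H') else c0
    if j - bi ≥ 0 ∧ 0 < ((prev[(j - bi).toNat]?).getD (0, ' ')).1 then (bi, 'T') else c1)

-- the outer 'for i in range(1, n+1)' loop; row i is appended when written.
-- pyGetD is exact here: inside Pre_solve every index is in range.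
def solveDP (n : Int) (abList : List (Int × Int)) : List (List (Int × Char)) :=
  (PySem.List.pyRange 1 (n + 1) 1).foldl
    (fun dp i =>
      let p := PySem.List.pyGetD abList (i - 1) (0, 0)
      dp ++ [solveRow ((PySem.List.pyGetD dp (i - 1) []).toArray) p.1 p.2])
    [row0]

def solve (n : Int) (s : Int) (abList : List (Int × Int)) : List String :=
  let dp := solveDP n abList
  if (PySem.List.pyGetD (PySem.List.pyGetD dp n []) s (0, ' ')).1 = 0 then ["No"]
  else
    let r := (PySem.List.pyRange n 0 (-1)).foldl
      (fun (p : List Char × Int) i =>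
        let cell := PySem.List.pyGetD (PySem.List.pyGetD dp i []) p.2 (0, ' ')
        (p.1 ++ [cell.2], p.2 - cell.1))
      ([], s)
    ["Yes", String.mk r.1.reverse]

-- ===== PORT B =====
-- Python B's cells: None/root -> Chain.root (value 1, empty face), ('H'/'T' cells) -> node
inductive Chain
  | root
  | node (v : Int) (c : Char) (t : Chain)
deriving DecidableEq, Repr

-- cell[0] of a cell (the root cell (1, '', None) has value 1)
def chainVal : Chain → Int
  | Chain.root => 1
  | Chain.node v _ _ => v

-- the while loop collecting faces from the chain (newest card first; root face '' stops it)
def walkChain : Chain → List Char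
  | Chain.root => []
  | Chain.node _ c t => c :: walkChain t

-- python helper _push: two loops over cur.items(); only live cells (value > 0) push,
-- and a 'T' (+b) write overwrites an 'H' (+a) one
def pushCard (cur : PySem.Dict Int Chain) (a b : Int) : PySem.Dict Int Chain :=
  let nxt := cur.items.foldl
    (fun d p => if 0 < chainVal p.2 ∧ p.1 + a ≤ 10000 then
        d.insert (p.1 + a) (Chain.node a 'H' p.2) else d)
    PySem.Dict.empty
  cur.items.foldl
    (fun d p => if 0 < chainVal p.2 ∧ p.1 + b ≤ 10000 then
        d.insert (p.1 + b) (Chain.node b 'T' p.2) else d)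
    nxt

def solve_alt (n : Int) (s : Int) (abList : List (Int × Int)) : List String :=
  let cur := (PySem.List.pyRange 0 n 1).foldl
    (fun c i =>
      let p := PySem.List.pyGetD abList i (0, 0)
      pushCard c p.1 p.2) ((PySem.Dict.empty).insert 0 Chain.root)
  match PySem.Dict.get? cur s with
  | none => ["No"]
  | some cell =>
      if chainVal cell = 0 then ["No"]
      else ["Yes", String.mk (walkChain cell).reverse]

-- ===== PRECONDITION & SPEC =====
-- Pre_solve is the problem's natural domain (ABC271-D: 0 ≤ S ≤ 10000, n cards given,
-- nonnegative card values). It excludes exactly: inputs where A raises IndexError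
-- (n < 0, n > len(abList), s > 10000, s < -10001, a negative a/b among the first n
-- pairs), and s in [-10001,-1], where A returns a value only through Python's
-- accidental negative-index wraparound (it answers for s+10001).
def Pre_solve (n : Int) (s : Int) (abList : List (Int × Int)) : Prop :=
  0 ≤ n ∧ n ≤ PySem.List.len abList ∧ 0 ≤ s ∧ s ≤ 10000 ∧
    ∀ p ∈ abList.take n.toNat, 0 ≤ p.1 ∧ 0 ≤ p.2
instance (n : Int) (s : Int) (abList : List (Int × Int)) : Decidable (Pre_solve n s abList) := by
  unfold Pre_solve; infer_instance

def pvWitness_solve : Int × Int × (List (Int × Int)) := (2, 4, [(1, 2), (3, 9)])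

def Spec_solve (n : Int) (s : Int) (abList : List (Int × Int)) (out : List String) : Prop := out = solve_alt n s abList
instance (n : Int) (s : Int) (abList : List (Int × Int)) (out : List String) : Decidable (Spec_solve n s abList out) := by unfold Spec_solve; infer_instance

-- ===== CLAIM (what is proved, stated in full; the proofs are below) =====
def Claim_equal_solve : Prop := ∀ (n : Int) (s : Int) (abList : List (Int × Int)), Dom_solve n s abList → Pre_solve n s abList → Spec_solve n s abList (solve n s abList)

-- ===== LEMMAS AND PROOFS =====

-- ---- A-side: row-by-row description of the DP table ----
def dpRows (ps : List (Int × Int)) : List (List (Int × Char)) :=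
  ps.foldl (fun dp p => dp ++ [solveRow (((dp.getLast?).getD []).toArray) p.1 p.2]) [row0]

def RowK (ps : List (Int × Int)) (k : Nat) : List (Int × Char) := (dpRows ps).getD k []

def cellOf (row : List (Int × Char)) (j : Int) : Int × Char := PySem.List.pyGetD row j (0, ' ')

-- A's reconstruction loop body, as a named step function
def stepA (dp : List (List (Int × Char))) (p : List Char × Int) (i : Int) : List Char × Int :=
  (p.1 ++ [(PySem.List.pyGetD (PySem.List.pyGetD dp i []) p.2 (0, ' ')).2],
   p.2 - (PySem.List.pyGetD (PySem.List.pyGetD dp i []) p.2 (0, ' ')).1)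

lemma foldl_snoc_length {α β : Type} (g : List α → β → α) (l : List β) :
    ∀ acc : List α, (l.foldl (fun dp p => dp ++ [g dp p]) acc).length = acc.length + l.length := by
  induction l with
  | nil => intro acc; simp
  | cons p t ih => intro acc; rw [List.foldl_cons, ih]; simp; omega

lemma dpRows_len (ps : List (Int × Int)) : (dpRows ps).length = ps.length + 1 := by
  unfold dpRows
  have h := foldl_snoc_length
    (fun (dp : List (List (Int × Char))) (p : Int × Int) =>
      solveRow (((dp.getLast?).getD []).toArray) p.1 p.2) ps [row0]
  simpa [Nat.add_comm] using h

lemma getD_append_left {α : Type} (l t : List α) (k : Nat) (d : α) (h : k < l.length) :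
    (l ++ t).getD k d = l.getD k d := by
  simp [List.getD_eq_getElem?_getD, List.getElem?_append_left h]

lemma getD_append_last {α : Type} (l : List α) (x : α) (d : α) :
    (l ++ [x]).getD l.length d = x := by
  simp [List.getD_eq_getElem?_getD, List.getElem?_append_right (Nat.le_refl l.length)]

lemma dpRows_last (ps : List (Int × Int)) :
    ((dpRows ps).getLast?).getD [] = RowK ps ps.length := by
  have hlen := dpRows_len ps
  rw [List.getLast?_eq_getElem?, RowK, List.getD_eq_getElem?_getD, hlen]
  simp

lemma dpRows_snoc (ps : List (Int × Int)) (p : Int × Int) :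
    dpRows (ps ++ [p]) = dpRows ps ++ [solveRow ((RowK ps ps.length).toArray) p.1 p.2] := by
  unfold dpRows
  rw [List.foldl_append, List.foldl_cons, List.foldl_nil]
  rw [show (ps.foldl (fun dp q => dp ++ [solveRow (((dp.getLast?).getD []).toArray) q.1 q.2])
      [row0]) = dpRows ps from rfl]
  rw [dpRows_last]

lemma RowK_zero (ps : List (Int × Int)) : RowK ps 0 = row0 := by
  induction ps using List.reverseRecOn with
  | nil => rfl
  | append_singleton ps p ih =>
    rw [RowK, dpRows_snoc, getD_append_left _ _ _ _ (by rw [dpRows_len]; omega)]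
    exact ih

lemma RowK_succ (ps : List (Int × Int)) (k : Nat) (hk : k < ps.length) :
    RowK ps (k + 1)
      = solveRow ((RowK ps k).toArray) (ps.getD k (0, 0)).1 (ps.getD k (0, 0)).2 := by
  induction ps using List.reverseRecOn generalizing k with
  | nil => simp at hk
  | append_singleton ps p ih =>
    rcases Nat.lt_or_ge k ps.length with h | h
    · have h1 : k + 1 < (dpRows ps).length := by rw [dpRows_len]; omega
      have h2 : k < (dpRows ps).length := by rw [dpRows_len]; omega
      rw [RowK, dpRows_snoc, getD_append_left _ _ _ _ h1]
      rw [show (dpRows ps).getD (k + 1) [] = RowK ps (k + 1) from rfl, ih k h]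
      rw [show RowK (ps ++ [p]) k = (dpRows (ps ++ [p])).getD k [] from rfl, dpRows_snoc,
        getD_append_left _ _ _ _ h2]
      rw [getD_append_left _ _ _ _ h]
      rfl
    · have hk' : k = ps.length := by
        simp [List.length_append] at hk; omega
      subst hk'
      rw [RowK, dpRows_snoc, show ps.length + 1 = (dpRows ps).length from (dpRows_len ps).symm,
        getD_append_last]
      have h2 : ps.length < (dpRows ps).length := by rw [dpRows_len]; omega
      rw [show RowK (ps ++ [p]) ps.length = (dpRows (ps ++ [p])).getD ps.length [] from rfl,
        dpRows_snoc, getD_append_left _ _ _ _ h2]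
      rw [getD_append_last]
      rfl

lemma cell_solveRow (prev : Array (Int × Char)) (a b : Int) (j : Int)
    (h0 : 0 ≤ j) (h1 : j ≤ 10000) :
    cellOf (solveRow prev a b) j =
      (if j - b ≥ 0 ∧ 0 < ((prev[(j - b).toNat]?).getD (0, ' ')).1 then (b, 'T')
       else if j - a ≥ 0 ∧ 0 < ((prev[(j - a).toNat]?).getD (0, ' ')).1 then (a, 'H')
       else ((0 : Int), ' ')) := by
  unfold cellOf solveRow
  rw [PySem.List.pyGetD_map_pyRange_of_nonneg _ _ _ _ h0 (by omega)]

lemma arrCell (l : List (Int × Char)) (i : Int) (h0 : 0 ≤ i) :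
    ((l.toArray[i.toNat]?).getD ((0 : Int), ' ')) = cellOf l i := by
  obtain ⟨m, rfl⟩ : ∃ m : Nat, i = (m : Int) := ⟨i.toNat, (Int.toNat_of_nonneg h0).symm⟩
  unfold cellOf
  rw [PySem.List.pyGetD_natCast, Int.toNat_natCast, List.getD_eq_getElem?_getD]
  first
  | rw [List.getElem?_toArray]
  | rw [Array.getElem?_toArray]

lemma set0_replicate_getD (n m : Nat) (v d : Int × Char) (h : m < n) :
    ((List.replicate n ((0 : Int), ' ')).set 0 v).getD m d
      = if m = 0 then v else ((0 : Int), ' ') := by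
  cases n with
  | zero => omega
  | succ n =>
    rw [List.replicate_succ, List.set_cons_zero]
    cases m with
    | zero => rfl
    | succ m =>
      rw [List.getD_cons_succ, if_neg (Nat.succ_ne_zero m)]
      have hm : m < n := by omega
      simp [List.getD_eq_getElem?_getD, List.getElem?_replicate, hm]

lemma cell_row0 (j : Int) (h0 : 0 ≤ j) (h1 : j ≤ 10000) :
    cellOf row0 j = (if j = 0 then ((1 : Int), ' ') else ((0 : Int), ' ')) := by
  obtain ⟨m, rfl⟩ : ∃ m : Nat, j = (m : Int) := ⟨j.toNat, (Int.toNat_of_nonneg h0).symm⟩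
  unfold cellOf row0
  rw [PySem.List.pyGetD_natCast, set0_replicate_getD 10001 m _ _ (by omega)]
  by_cases hm : m = 0
  · subst hm
    simp
  · rw [if_neg hm, if_neg (by omega : ¬ ((m : Int) = 0))]

lemma getD_mem (ps : List (Int × Int)) (k : Nat) (hk : k < ps.length) :
    ps.getD k (0, 0) ∈ ps := by
  rw [List.getD_eq_getElem ps (0, 0) hk]
  exact List.getElem_mem hk

-- the sparse forward cells, described densely for the proof: cellB ps k j is A's dp[k][j]
def cellB (ps : List (Int × Int)) : Nat → Int → Int × Char
  | 0, x => if x = 0 then ((1 : Int), ' ') else ((0 : Int), ' ')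
  | Nat.succ k, x =>
      if 0 < (cellB ps k (x - (ps.getD k (0, 0)).2)).1 then ((ps.getD k (0, 0)).2, 'T')
      else if 0 < (cellB ps k (x - (ps.getD k (0, 0)).1)).1 then ((ps.getD k (0, 0)).1, 'H')
      else ((0 : Int), ' ')

-- the canonical parent chain stored by B for a written sum
def chainB (ps : List (Int × Int)) : Nat → Int → Chain
  | 0, _ => Chain.root
  | Nat.succ k, x =>
      if 0 < (cellB ps k (x - (ps.getD k (0, 0)).2)).1
      then Chain.node (ps.getD k (0, 0)).2 'T' (chainB ps k (x - (ps.getD k (0, 0)).2))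
      else Chain.node (ps.getD k (0, 0)).1 'H' (chainB ps k (x - (ps.getD k (0, 0)).1))

-- which sums hold a written cell (live or dead) after k cards
def writtenB (ps : List (Int × Int)) : Nat → Int → Bool
  | 0, y => y == 0
  | Nat.succ k, y =>
      (decide (0 < (cellB ps k (y - (ps.getD k (0, 0)).2)).1)
        || decide (0 < (cellB ps k (y - (ps.getD k (0, 0)).1)).1)) && decide (y ≤ 10000)

-- rfl equations (the structural-recursion unfoldings, named for rw)
lemma cellB_succ (ps : List (Int × Int)) (k : Nat) (x : Int) :
    cellB ps (k + 1) x =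
      (if 0 < (cellB ps k (x - (ps.getD k (0, 0)).2)).1 then ((ps.getD k (0, 0)).2, 'T')
       else if 0 < (cellB ps k (x - (ps.getD k (0, 0)).1)).1 then ((ps.getD k (0, 0)).1, 'H')
       else ((0 : Int), ' ')) := rfl

lemma chainB_succ (ps : List (Int × Int)) (k : Nat) (x : Int) :
    chainB ps (k + 1) x =
      (if 0 < (cellB ps k (x - (ps.getD k (0, 0)).2)).1
       then Chain.node (ps.getD k (0, 0)).2 'T' (chainB ps k (x - (ps.getD k (0, 0)).2))
       else Chain.node (ps.getD k (0, 0)).1 'H' (chainB ps k (x - (ps.getD k (0, 0)).1))) := rfl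

lemma writtenB_succ (ps : List (Int × Int)) (k : Nat) (y : Int) :
    writtenB ps (k + 1) y =
      ((decide (0 < (cellB ps k (y - (ps.getD k (0, 0)).2)).1)
        || decide (0 < (cellB ps k (y - (ps.getD k (0, 0)).1)).1)) && decide (y ≤ 10000)) := rfl

-- a live cell lies at a nonnegative, written sum
lemma alive_bounds (ps : List (Int × Int)) (hpos : ∀ p ∈ ps, 0 ≤ p.1 ∧ 0 ≤ p.2) :
    ∀ k : Nat, k ≤ ps.length → ∀ y : Int, y ≤ 10000 → 0 < (cellB ps k y).1 →
      0 ≤ y ∧ writtenB ps k y = true := by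
  intro k
  induction k with
  | zero =>
    intro _ y _ hy
    by_cases h0 : y = 0
    · subst h0; exact ⟨le_refl _, by simp [writtenB]⟩
    · exact absurd hy (by simp [cellB, h0])
  | succ k ih =>
    intro hk y hcap hy
    have hkps : k < ps.length := by omega
    have hpk := hpos _ (getD_mem ps k hkps)
    rw [cellB_succ] at hy
    rw [writtenB_succ]
    by_cases hT : 0 < (cellB ps k (y - (ps.getD k (0, 0)).2)).1
    · have := ih (by omega) _ (by omega) hT
      refine ⟨by omega, ?_⟩
      simp only [Bool.and_eq_true, Bool.or_eq_true, decide_eq_true_eq]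
      exact ⟨Or.inl hT, hcap⟩
    · rw [if_neg hT] at hy
      by_cases hH : 0 < (cellB ps k (y - (ps.getD k (0, 0)).1)).1
      · have := ih (by omega) _ (by omega) hH
        refine ⟨by omega, ?_⟩
        simp only [Bool.and_eq_true, Bool.or_eq_true, decide_eq_true_eq]
        exact ⟨Or.inr hH, hcap⟩
      · rw [if_neg hH] at hy
        exact absurd hy (by norm_num)

lemma cellB_nonneg (ps : List (Int × Int)) (hpos : ∀ p ∈ ps, 0 ≤ p.1 ∧ 0 ≤ p.2)
    (k : Nat) (hk : k ≤ ps.length) (y : Int) : 0 ≤ (cellB ps k y).1 := by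
  cases k with
  | zero =>
    by_cases h0 : y = 0 <;> simp [cellB, h0]
  | succ k =>
    have hkps : k < ps.length := by omega
    have hpk := hpos _ (getD_mem ps k hkps)
    rw [cellB_succ]
    split_ifs
    · exact hpk.2
    · exact hpk.1
    · norm_num

-- the stored chain's head value is the cell value, at every written sum
lemma chainVal_eq (ps : List (Int × Int)) (k : Nat) (y : Int)
    (hw : writtenB ps k y = true) : chainVal (chainB ps k y) = (cellB ps k y).1 := by
  cases k with
  | zero =>
    have h0 : y = 0 := by simpa [writtenB] using hw
    subst h0
    simp [chainB, chainVal, cellB]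
  | succ k =>
    rw [writtenB_succ] at hw
    rw [chainB_succ, cellB_succ]
    by_cases hT : 0 < (cellB ps k (y - (ps.getD k (0, 0)).2)).1
    · rw [if_pos hT, if_pos hT]; rfl
    · have hH : 0 < (cellB ps k (y - (ps.getD k (0, 0)).1)).1 := by
        simp only [Bool.and_eq_true, Bool.or_eq_true, decide_eq_true_eq] at hw
        exact hw.1.resolve_left hT
      rw [if_neg hT, if_neg hT, if_pos hH]; rfl

-- A's dense rows carry exactly these cells
lemma rows_eq (ps : List (Int × Int)) (hpos : ∀ p ∈ ps, 0 ≤ p.1 ∧ 0 ≤ p.2) :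
    ∀ k : Nat, k ≤ ps.length → ∀ j : Int, 0 ≤ j → j ≤ 10000 →
      cellOf (RowK ps k) j = cellB ps k j := by
  intro k
  induction k with
  | zero =>
    intro _ j h0 h1
    rw [RowK_zero, cell_row0 j h0 h1]
    by_cases hj : j = 0 <;> simp [cellB, hj]
  | succ k ih =>
    intro hk j h0 h1
    have hkps : k < ps.length := by omega
    have hpk := hpos _ (getD_mem ps k hkps)
    rw [RowK_succ ps k hkps, cell_solveRow _ _ _ j h0 h1, cellB_succ]
    have hTiff : (j - (ps.getD k (0, 0)).2 ≥ 0 ∧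
        0 < (((RowK ps k).toArray[(j - (ps.getD k (0, 0)).2).toNat]?).getD
          ((0 : Int), ' ')).1) ↔ 0 < (cellB ps k (j - (ps.getD k (0, 0)).2)).1 := by
      constructor
      · rintro ⟨hge, hp⟩
        rw [arrCell _ _ hge, ih (by omega) _ hge (by omega)] at hp
        exact hp
      · intro hm
        have := alive_bounds ps hpos k (by omega) _ (by omega) hm
        refine ⟨by omega, ?_⟩
        rw [arrCell _ _ (by omega), ih (by omega) _ (by omega) (by omega)]
        exact hm
    have hHiff : (j - (ps.getD k (0, 0)).1 ≥ 0 ∧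
        0 < (((RowK ps k).toArray[(j - (ps.getD k (0, 0)).1).toNat]?).getD
          ((0 : Int), ' ')).1) ↔ 0 < (cellB ps k (j - (ps.getD k (0, 0)).1)).1 := by
      constructor
      · rintro ⟨hge, hp⟩
        rw [arrCell _ _ hge, ih (by omega) _ hge (by omega)] at hp
        exact hp
      · intro hm
        have := alive_bounds ps hpos k (by omega) _ (by omega) hm
        refine ⟨by omega, ?_⟩
        rw [arrCell _ _ (by omega), ih (by omega) _ (by omega) (by omega)]
        exact hm
    rw [if_congr hTiff rfl (if_congr hHiff rfl rfl)]
-- unfolding lemma for A's DP builder (removes the let)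
lemma solveDP_def (n : Int) (ab : List (Int × Int)) :
    solveDP n ab = (PySem.List.pyRange 1 (n + 1) 1).foldl
      (fun dp i =>
        dp ++ [solveRow ((PySem.List.pyGetD dp (i - 1) []).toArray)
          (PySem.List.pyGetD ab (i - 1) (0, 0)).1 (PySem.List.pyGetD ab (i - 1) (0, 0)).2])
      [row0] := rfl

lemma solveDP_take (ab : List (Int × Int)) :
    ∀ N : Nat, N ≤ ab.length → solveDP (N : Int) ab = dpRows (ab.take N) := by
  intro N
  induction N with
  | zero =>
    intro _
    rw [solveDP_def, PySem.List.pyRange_one_eq_nil (by omega)]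
    rfl
  | succ N ih =>
    intro h
    have hN : N ≤ ab.length := by omega
    have hlt : N < ab.length := by omega
    rw [solveDP_def]
    have hcast : ((N + 1 : Nat) : Int) + 1 = ((N : Int) + 1) + 1 := by push_cast; ring
    rw [hcast, PySem.List.pyRange_one_succ_right (by omega), List.foldl_append,
      ← solveDP_def, ih hN, List.foldl_cons, List.foldl_nil]
    have e1 : ((N : Int) + 1 - 1) = (N : Int) := by ring
    rw [e1]
    have e2 : PySem.List.pyGetD (dpRows (ab.take N)) ((N : Int)) [] = RowK (ab.take N) N := by
      rw [PySem.List.pyGetD_natCast]; rfl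
    have e3 : PySem.List.pyGetD ab ((N : Int)) (0, 0) = (ab.take (N + 1)).getD N (0, 0) := by
      rw [PySem.List.pyGetD_natCast]
      rw [List.getD_eq_getElem ab (0, 0) hlt,
        List.getD_eq_getElem _ (0, 0) (by rw [List.length_take]; omega)]
      simp [List.getElem_take]
    rw [e2, e3]
    have e4 : ab.take (N + 1) = ab.take N ++ [ab[N]'hlt] := by
      rw [List.take_succ, List.getElem?_eq_getElem hlt]
      rfl
    have e5 : (ab.take (N + 1)).getD N (0, 0) = ab[N]'hlt := by
      rw [e4]
      have hl : (ab.take N).length = N := by rw [List.length_take]; omega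
      simpa [hl] using getD_append_last (ab.take N) (ab[N]'hlt) ((0 : Int), (0 : Int))
    rw [e5, e4, dpRows_snoc]
    have e6 : (ab.take N).length = N := by rw [List.length_take]; omega
    rw [e6]

-- backward reconstruction: A's loop spells out exactly B's chain at a live sum
lemma recon (ps : List (Int × Int)) (hpos : ∀ p ∈ ps, 0 ≤ p.1 ∧ 0 ≤ p.2) :
    ∀ (k : Nat), k ≤ ps.length → ∀ (x : Int), 0 ≤ x → x ≤ 10000 →
      0 < (cellB ps k x).1 → ∀ (acc : List Char),
      ((PySem.List.pyRange (k : Int) 0 (-1)).foldl (stepA (dpRows ps)) (acc, x)).1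
        = acc ++ walkChain (chainB ps k x) := by
  intro k
  induction k with
  | zero =>
    intro _ x _ _ _ acc
    rw [PySem.List.pyRange_neg_one_eq_nil (by omega)]
    simp [chainB, walkChain]
  | succ k ih =>
    intro hk1 x hx0 hx1 hx acc
    have hk : k ≤ ps.length := by omega
    have hkps : k < ps.length := by omega
    have hpk := hpos _ (getD_mem ps k hkps)
    have hcons : PySem.List.pyRange ((k + 1 : Nat) : Int) 0 (-1)
        = ((k + 1 : Nat) : Int) :: PySem.List.pyRange (((k + 1 : Nat) : Int) - 1) 0 (-1) := by
      rw [PySem.List.pyRange_neg_one_cons (by omega)]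
    have ecast : (((k + 1 : Nat) : Int) - 1) = ((k : Nat) : Int) := by push_cast; ring
    rw [hcons, ecast, List.foldl_cons]
    have eA1 : PySem.List.pyGetD (dpRows ps) ((k + 1 : Nat) : Int) []
        = RowK ps (k + 1) := by
      rw [PySem.List.pyGetD_natCast]; rfl
    have hcell : cellOf (RowK ps (k + 1)) x = cellB ps (k + 1) x :=
      rows_eq ps hpos (k + 1) hk1 x hx0 hx1
    by_cases hT : 0 < (cellB ps k (x - (ps.getD k (0, 0)).2)).1
    · have hcellval : cellB ps (k + 1) x = ((ps.getD k (0, 0)).2, 'T') := by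
        rw [cellB_succ, if_pos hT]
      have hstepA : stepA (dpRows ps) (acc, x) ((k + 1 : Nat) : Int)
          = (acc ++ ['T'], x - (ps.getD k (0, 0)).2) := by
        show (acc ++ [(PySem.List.pyGetD (PySem.List.pyGetD (dpRows ps)
            ((k + 1 : Nat) : Int) []) x (0, ' ')).2],
          x - (PySem.List.pyGetD (PySem.List.pyGetD (dpRows ps)
            ((k + 1 : Nat) : Int) []) x (0, ' ')).1) = _
        rw [eA1,
          show PySem.List.pyGetD (RowK ps (k + 1)) x (0, ' ')
            = cellOf (RowK ps (k + 1)) x from rfl, hcell, hcellval]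
      have hb := alive_bounds ps hpos k hk _ (by omega) hT
      rw [hstepA, ih hk _ hb.1 (by omega) hT (acc ++ ['T'])]
      rw [chainB_succ, if_pos hT]
      simp [walkChain]
    · have hH : 0 < (cellB ps k (x - (ps.getD k (0, 0)).1)).1 := by
        by_contra hH
        rw [cellB_succ, if_neg hT, if_neg hH] at hx
        exact absurd hx (by norm_num)
      have hcellval : cellB ps (k + 1) x = ((ps.getD k (0, 0)).1, 'H') := by
        rw [cellB_succ, if_neg hT, if_pos hH]
      have hstepA : stepA (dpRows ps) (acc, x) ((k + 1 : Nat) : Int)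
          = (acc ++ ['H'], x - (ps.getD k (0, 0)).1) := by
        show (acc ++ [(PySem.List.pyGetD (PySem.List.pyGetD (dpRows ps)
            ((k + 1 : Nat) : Int) []) x (0, ' ')).2],
          x - (PySem.List.pyGetD (PySem.List.pyGetD (dpRows ps)
            ((k + 1 : Nat) : Int) []) x (0, ' ')).1) = _
        rw [eA1,
          show PySem.List.pyGetD (RowK ps (k + 1)) x (0, ' ')
            = cellOf (RowK ps (k + 1)) x from rfl, hcell, hcellval]
      have hb := alive_bounds ps hpos k hk _ (by omega) hH
      rw [hstepA, ih hk _ hb.1 (by omega) hH (acc ++ ['H'])]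
      rw [chainB_succ, if_neg hT]
      simp [walkChain]

-- ---- B-side: the rolling dict of cells ----
def dictK (ps : List (Int × Int)) : PySem.Dict Int Chain :=
  ps.foldl (fun c p => pushCard c p.1 p.2) ((PySem.Dict.empty).insert 0 Chain.root)

lemma dictK_snoc (ps : List (Int × Int)) (p : Int × Int) :
    dictK (ps ++ [p]) = pushCard (dictK ps) p.1 p.2 := by
  unfold dictK
  rw [List.foldl_append, List.foldl_cons, List.foldl_nil]

-- B's indexed loop over range(n) builds exactly dictK of the first n cards
lemma altDP_take (ab : List (Int × Int)) :
    ∀ N : Nat, N ≤ ab.length →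
      (PySem.List.pyRange 0 (N : Int) 1).foldl
        (fun c i =>
          let p := PySem.List.pyGetD ab i (0, 0)
          pushCard c p.1 p.2) ((PySem.Dict.empty).insert 0 Chain.root)
      = dictK (ab.take N) := by
  intro N
  induction N with
  | zero =>
    intro _
    rw [PySem.List.pyRange_one_eq_nil (by omega)]
    rfl
  | succ N ih =>
    intro h
    have hN : N ≤ ab.length := by omega
    have hlt : N < ab.length := by omega
    have hcast : ((N + 1 : Nat) : Int) = ((N : Int)) + 1 := by push_cast; ring
    rw [hcast, PySem.List.pyRange_one_succ_right (by omega), List.foldl_append,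
      ih hN, List.foldl_cons, List.foldl_nil]
    have e3 : PySem.List.pyGetD ab ((N : Int)) (0, 0) = ab[N]'hlt := by
      rw [PySem.List.pyGetD_natCast]
      exact List.getD_eq_getElem ab (0, 0) hlt
    have e4 : ab.take (N + 1) = ab.take N ++ [ab[N]'hlt] := by
      rw [List.take_succ, List.getElem?_eq_getElem hlt]
      rfl
    rw [e4, dictK_snoc]
    show pushCard (dictK (ab.take N)) (PySem.List.pyGetD ab ((N : Int)) (0, 0)).1
        (PySem.List.pyGetD ab ((N : Int)) (0, 0)).2 = _
    rw [e3]

-- one insert pass over an association list with distinct keys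
lemma pass_get? (c0 : Int) (ch : Char) :
    ∀ (l : List (Int × Chain)), (l.map Prod.fst).Nodup →
      ∀ (acc : PySem.Dict Int Chain) (y : Int),
      (l.foldl (fun d p => if 0 < chainVal p.2 ∧ p.1 + c0 ≤ 10000 then
          d.insert (p.1 + c0) (Chain.node c0 ch p.2) else d) acc).get? y
      = (match l.find? (fun p => p.1 == y - c0) with
         | some p => if 0 < chainVal p.2 ∧ y ≤ 10000 then some (Chain.node c0 ch p.2)
             else acc.get? y
         | none => acc.get? y) := by
  intro l
  induction l with
  | nil =>
    intro _ acc y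
    simp
  | cons p t ih =>
    intro hnd acc y
    have hndt : (t.map Prod.fst).Nodup := by
      simp at hnd
      exact hnd.2
    have hpnot : p.1 ∉ t.map Prod.fst := by
      simp at hnd
      intro hc
      exact absurd hc (by simpa using hnd.1)
    rw [List.foldl_cons]
    by_cases hp : p.1 = y - c0
    · have hf : (p :: t).find? (fun q => q.1 == y - c0) = some p := by
        rw [List.find?_cons_of_pos]
        simp [hp]
      have hfn : t.find? (fun q => q.1 == y - c0) = none := by
        rw [List.find?_eq_none]
        intro q hq
        simp
        intro hq1
        exact absurd (hq1 ▸ List.mem_map_of_mem hq : (y - c0) ∈ t.map Prod.fst)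
          (hp ▸ hpnot)
      rw [hf]
      by_cases hg : 0 < chainVal p.2 ∧ y ≤ 10000
      · rw [if_pos (by constructor; exact hg.1; omega)]
        rw [ih hndt _ y]
        have hkey : p.1 + c0 = y := by omega
        rw [hfn, hkey]
        simp [hg, PySem.Dict.get?_insert_self]
      · rw [if_neg (by rw [hp]; omega)]
        rw [ih hndt _ y, hfn]
        simp [hg]
    · have hf : (p :: t).find? (fun q => q.1 == y - c0)
          = t.find? (fun q => q.1 == y - c0) := by
        rw [List.find?_cons_of_neg]
        simp [hp]
      have hacc : ∀ d : PySem.Dict Int Chain,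
          ((if 0 < chainVal p.2 ∧ p.1 + c0 ≤ 10000 then
              d.insert (p.1 + c0) (Chain.node c0 ch p.2) else d)).get? y
            = d.get? y := by
        intro d
        split_ifs with hg
        · rw [PySem.Dict.get?_insert]
          exact if_neg (by omega)
        · rfl
      rw [ih hndt _ y]
      simp only [hacc]
      rw [hf]

-- get? after pushing one card
lemma push_get? (cur : PySem.Dict Int Chain) (a b : Int) (hnd : cur.keys.Nodup) (y : Int) :
    (pushCard cur a b).get? y
      = (match cur.get? (y - b) with
         | some v =>
             if 0 < chainVal v ∧ y ≤ 10000 then some (Chain.node b 'T' v)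
             else (match cur.get? (y - a) with
                   | some w => if 0 < chainVal w ∧ y ≤ 10000 then some (Chain.node a 'H' w)
                       else none
                   | none => none)
         | none =>
             (match cur.get? (y - a) with
              | some w => if 0 < chainVal w ∧ y ≤ 10000 then some (Chain.node a 'H' w)
                  else none
              | none => none)) := by
  have hndi : (cur.items.map Prod.fst).Nodup := hnd
  have hget : ∀ z : Int, cur.get? z
      = (cur.items.find? (fun p => p.1 == z)).map Prod.snd := fun _ => rfl
  unfold pushCard
  rw [pass_get? b 'T' cur.items hndi _ y, pass_get? a 'H' cur.items hndi _ y,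
    PySem.Dict.get?_empty]
  rw [hget (y - b), hget (y - a)]
  cases hfb : cur.items.find? (fun p => p.1 == y - b) with
  | some p =>
    cases hfa : cur.items.find? (fun p => p.1 == y - a) <;> simp
  | none =>
    cases hfa : cur.items.find? (fun p => p.1 == y - a) <;> simp

-- keys stay distinct through a push
lemma push_nodup (cur : PySem.Dict Int Chain) (a b : Int) (hnd : cur.keys.Nodup) :
    (pushCard cur a b).keys.Nodup := by
  unfold pushCard
  have hrw : ∀ (c0 : Int) (ch : Char) (acc : PySem.Dict Int Chain),
      cur.items.foldl (fun d p => if 0 < chainVal p.2 ∧ p.1 + c0 ≤ 10000 then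
          d.insert (p.1 + c0) (Chain.node c0 ch p.2) else d) acc
        = (cur.items.filter (fun p => decide (0 < chainVal p.2 ∧ p.1 + c0 ≤ 10000))).foldl
            (fun d p => d.insert (p.1 + c0) (Chain.node c0 ch p.2)) acc := by
    intro c0 ch acc
    have h := List.foldl_filter
      (p := fun p : Int × Chain => decide (0 < chainVal p.2 ∧ p.1 + c0 ≤ 10000))
      (f := fun (d : PySem.Dict Int Chain) (p : Int × Chain) =>
        d.insert (p.1 + c0) (Chain.node c0 ch p.2))
      (init := acc) (l := cur.items)
    simpa only [decide_eq_true_eq] using h.symm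
  rw [hrw, hrw]
  exact PySem.Dict.nodup_keys_foldl_insert_key _ (fun p : Int × Chain => p.1 + b)
    (fun _ (p : Int × Chain) => Chain.node b 'T' p.2) _
    (PySem.Dict.nodup_keys_foldl_insert_key _ (fun p : Int × Chain => p.1 + a)
      (fun _ (p : Int × Chain) => Chain.node a 'H' p.2) _ PySem.Dict.nodup_keys_empty)

-- cellB / chainB / writtenB only look at the first k cards
lemma cellB_prefix (ps : List (Int × Int)) (p : Int × Int) :
    ∀ k : Nat, k ≤ ps.length → ∀ x : Int, cellB (ps ++ [p]) k x = cellB ps k x := by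
  intro k
  induction k with
  | zero => intro _ x; rfl
  | succ k ih =>
    intro hk x
    have hkps : k < ps.length := by omega
    rw [cellB_succ, cellB_succ, getD_append_left ps [p] k (0, 0) hkps]
    simp only [ih (by omega)]

lemma chainB_prefix (ps : List (Int × Int)) (p : Int × Int) :
    ∀ k : Nat, k ≤ ps.length → ∀ x : Int, chainB (ps ++ [p]) k x = chainB ps k x := by
  intro k
  induction k with
  | zero => intro _ x; rfl
  | succ k ih =>
    intro hk x
    have hkps : k < ps.length := by omega
    rw [chainB_succ, chainB_succ, getD_append_left ps [p] k (0, 0) hkps]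
    simp only [cellB_prefix ps p k (by omega), ih (by omega)]

-- main B-side invariant: the rolling dict holds exactly the written cells with their chains
lemma dictK_inv (ps : List (Int × Int)) (hpos : ∀ p ∈ ps, 0 ≤ p.1 ∧ 0 ≤ p.2) :
    (dictK ps).keys.Nodup ∧
      ∀ y : Int, (dictK ps).get? y
        = if writtenB ps ps.length y then some (chainB ps ps.length y) else none := by
  induction ps using List.reverseRecOn with
  | nil =>
    constructor
    · exact PySem.Dict.nodup_keys_insert _ _ _ PySem.Dict.nodup_keys_empty
    · intro y
      show ((PySem.Dict.empty).insert 0 Chain.root).get? y = _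
      rw [PySem.Dict.get?_insert, PySem.Dict.get?_empty]
      by_cases hy : y = 0
      · subst hy; simp [writtenB, chainB]
      · simp [writtenB, chainB, hy]
  | append_singleton ps p ih =>
    have hposps : ∀ q ∈ ps, 0 ≤ q.1 ∧ 0 ≤ q.2 := fun q hq =>
      hpos q (List.mem_append_left _ hq)
    have hpp : 0 ≤ p.1 ∧ 0 ≤ p.2 := hpos p (List.mem_append_right _ (List.mem_singleton.mpr rfl))
    obtain ⟨ihN, ihG⟩ := ih hposps
    have hsnoc : dictK (ps ++ [p]) = pushCard (dictK ps) p.1 p.2 := dictK_snoc ps p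
    constructor
    · rw [hsnoc]; exact push_nodup _ _ _ ihN
    · intro y
      rw [hsnoc, push_get? _ _ _ ihN y]
      have hlen : (ps ++ [p]).length = ps.length + 1 := by simp
      rw [hlen]
      have hwr : writtenB (ps ++ [p]) (ps.length + 1) y
          = ((decide (0 < (cellB ps ps.length (y - p.2)).1)
              || decide (0 < (cellB ps ps.length (y - p.1)).1)) && decide (y ≤ 10000)) := by
        rw [writtenB_succ, getD_append_last]
        simp only [cellB_prefix ps p ps.length (le_refl _)]
      have hch : chainB (ps ++ [p]) (ps.length + 1) y
          = (if 0 < (cellB ps ps.length (y - p.2)).1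
             then Chain.node p.2 'T' (chainB ps ps.length (y - p.2))
             else Chain.node p.1 'H' (chainB ps ps.length (y - p.1))) := by
        rw [chainB_succ, getD_append_last]
        simp only [cellB_prefix ps p ps.length (le_refl _),
          chainB_prefix ps p ps.length (le_refl _)]
      rw [ihG (y - p.2), ihG (y - p.1), hwr, hch]
      by_cases hy : y ≤ 10000
      · by_cases hT : 0 < (cellB ps ps.length (y - p.2)).1
        · have hwT : writtenB ps ps.length (y - p.2) = true :=
            (alive_bounds ps hposps ps.length (le_refl _) _ (by omega) hT).2
          have hvT := chainVal_eq ps ps.length (y - p.2) hwT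
          simp [hwT, hvT, hT, hy]
        · have hnoT : (match (if writtenB ps ps.length (y - p.2) = true
                then some (chainB ps ps.length (y - p.2)) else none : Option Chain) with
              | some v => if 0 < chainVal v ∧ y ≤ 10000 then some (Chain.node p.2 'T' v)
                  else (match (if writtenB ps ps.length (y - p.1) = true
                      then some (chainB ps ps.length (y - p.1)) else none : Option Chain) with
                    | some w => if 0 < chainVal w ∧ y ≤ 10000 then some (Chain.node p.1 'H' w)
                        else none
                    | none => none)
              | none =>
                  (match (if writtenB ps ps.length (y - p.1) = true
                      then some (chainB ps ps.length (y - p.1)) else none : Option Chain) with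
                    | some w => if 0 < chainVal w ∧ y ≤ 10000 then some (Chain.node p.1 'H' w)
                        else none
                    | none => none))
              = (match (if writtenB ps ps.length (y - p.1) = true
                  then some (chainB ps ps.length (y - p.1)) else none : Option Chain) with
                | some w => if 0 < chainVal w ∧ y ≤ 10000 then some (Chain.node p.1 'H' w)
                    else none
                | none => none) := by
            by_cases hwT : writtenB ps ps.length (y - p.2) = true
            · have hvT := chainVal_eq ps ps.length (y - p.2) hwT
              simp [hwT, hvT, hT]
            · simp [hwT]
          rw [hnoT]
          by_cases hH : 0 < (cellB ps ps.length (y - p.1)).1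
          · have hwH : writtenB ps ps.length (y - p.1) = true :=
              (alive_bounds ps hposps ps.length (le_refl _) _ (by omega) hH).2
            have hvH := chainVal_eq ps ps.length (y - p.1) hwH
            simp [hwH, hvH, hH, hT, hy]
          · by_cases hwH : writtenB ps ps.length (y - p.1) = true
            · have hvH := chainVal_eq ps ps.length (y - p.1) hwH
              simp [hwH, hvH, hH, hT]
            · simp [hwH, hT, hH]
      · -- y > 10000: every push guard fails and writtenB's cap fails
        by_cases hwT : writtenB ps ps.length (y - p.2) = true <;>
          by_cases hwH : writtenB ps ps.length (y - p.1) = true <;>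
          simp [hwT, hwH, hy]

-- ===== VERDICT (by name: the statement is the Claim_ definition above) =====
theorem solve_spec : Claim_equal_solve := by
  intro n s ab _ hpre
  obtain ⟨hn0, hnlen, hs0, hs1, hposIn⟩ := hpre
  obtain ⟨N, rfl⟩ : ∃ N : Nat, n = (N : Int) := ⟨n.toNat, (Int.toNat_of_nonneg hn0).symm⟩
  have hNlen : N ≤ ab.length := by
    rw [PySem.List.len_eq] at hnlen; omega
  set ps := ab.take N with hps
  have hpos : ∀ p ∈ ps, 0 ≤ p.1 ∧ 0 ≤ p.2 := by
    intro p hp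
    apply hposIn
    simpa using hp
  have hlen : ps.length = N := by rw [hps, List.length_take]; omega
  show solve (N : Int) s ab = solve_alt (N : Int) s ab
  simp only [solve, solve_alt]
  rw [solveDP_take ab N hNlen, altDP_take ab N hNlen]
  rw [show ab.take N = ps from rfl]
  have eDp : PySem.List.pyGetD (dpRows ps) ((N : Int)) [] = RowK ps N := by
    rw [PySem.List.pyGetD_natCast]; rfl
  rw [eDp]
  have hcellE : PySem.List.pyGetD (RowK ps N) s (0, ' ') = cellOf (RowK ps N) s := rfl
  rw [hcellE, rows_eq ps hpos N (by omega) s hs0 hs1]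
  obtain ⟨dN, dG⟩ := dictK_inv ps hpos
  have hGs := dG s
  rw [hlen] at hGs
  rw [hGs]
  have hnn := cellB_nonneg ps hpos N (by omega) s
  by_cases hw : writtenB ps N s = true
  · rw [if_pos hw]
    have hv := chainVal_eq ps N s hw
    by_cases hz : (cellB ps N s).1 = 0
    · rw [if_pos hz]
      show ["No"] = if chainVal (chainB ps N s) = 0 then ["No"] else _
      rw [if_pos (by rw [hv]; exact hz)]
    · rw [if_neg hz]
      have halive : 0 < (cellB ps N s).1 := by omega
      have hfoldA := recon ps hpos N (by omega) s hs0 hs1 halive []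
      show ["Yes", String.mk (((PySem.List.pyRange (N : Int) 0 (-1)).foldl
          (stepA (dpRows ps)) ([], s)).1.reverse)]
        = if chainVal (chainB ps N s) = 0 then ["No"]
          else ["Yes", String.mk (walkChain (chainB ps N s)).reverse]
      rw [if_neg (by rw [hv]; exact hz), hfoldA]
      simp
  · rw [if_neg hw]
    have hz : (cellB ps N s).1 = 0 := by
      by_contra hc
      have halive : 0 < (cellB ps N s).1 := by omega
      exact hw (alive_bounds ps hpos N (by omega) s hs1 halive).2
    rw [if_pos hz]
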